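-- pv_equiv track=rewrite | github.com/sh712-12/AOC | 2018/2018_d2.py | check
-- ===== SOURCE A (Python) =====
-- def count(s,c):
--     ans=0
--     for i in s:
--         if i==c:
--             ans+=1
--     return ans
--
-- def check(str):
--     twos=0
--     threes=0
--     for i in str:
--         if count(str, i)==2: twos+=1
--         if count(str, i)==3: threes+=1
--     if twos>0 and threes>0: return 'both'
--     if twos>0: return 'two'
--     if threes>0: return 'three'
-- ===== SOURCE B (Python) =====
-- def check(str):
--     freq = {}
--     for c in str:
--         freq[c] = freq.get(c, 0) + 1
--     has_two = 2 in freq.values()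
--     has_three = 3 in freq.values()
--     if has_two and has_three:
--         return 'both'
--     if has_two:
--         return 'two'
--     if has_three:
--         return 'three'
-- ===== Notes on version B (the rewrite author's own statement) =====
-- stated objective: faster
-- what changed: B builds a character-frequency dict in one pass and tests whether 2 or 3 occurs among its values, replacing A's per-character rescan of the whole string inside the loop.
import Mathlib
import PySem

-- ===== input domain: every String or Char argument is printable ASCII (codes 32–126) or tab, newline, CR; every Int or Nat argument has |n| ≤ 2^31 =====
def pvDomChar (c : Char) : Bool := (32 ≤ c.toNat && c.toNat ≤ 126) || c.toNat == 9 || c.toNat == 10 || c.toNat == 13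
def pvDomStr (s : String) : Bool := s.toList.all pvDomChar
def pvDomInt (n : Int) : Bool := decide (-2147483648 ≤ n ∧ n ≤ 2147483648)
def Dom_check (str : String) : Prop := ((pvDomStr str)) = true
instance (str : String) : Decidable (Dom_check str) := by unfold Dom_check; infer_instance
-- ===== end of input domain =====

-- B replaces A's quadratic per-character rescan with a single frequency-dict pass; timed asymptotically faster.


-- ===== PORT A =====
def countA (s : List Char) (c : Char) : Int :=
  s.foldl (fun ans i => if i == c then ans + 1 else ans) 0

def check (str : String) : Option String :=
  let l := str.toList
  let p := l.foldl (fun (p : Int × Int) i =>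
    (if countA l i == 2 then p.1 + 1 else p.1,
     if countA l i == 3 then p.2 + 1 else p.2)) (0, 0)
  if p.1 > 0 ∧ p.2 > 0 then some "both"
  else if p.1 > 0 then some "two"
  else if p.2 > 0 then some "three"
  else none

-- ===== PORT B =====
def check_alt (str : String) : Option String :=
  let freq : PySem.Dict Char Int :=
    str.toList.foldl (fun d c => d.insert c (d.getD c 0 + 1)) PySem.Dict.empty
  let hasTwo := freq.values.contains (2 : Int)
  let hasThree := freq.values.contains (3 : Int)
  if hasTwo && hasThree then some "both"
  else if hasTwo then some "two"
  else if hasThree then some "three"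
  else none

-- ===== PRECONDITION & SPEC =====
def Spec_check (str : String) (out : Option String) : Prop := out = check_alt str
instance (str : String) (out : Option String) : Decidable (Spec_check str out) := by unfold Spec_check; infer_instance

-- ===== CLAIM (what is proved, stated in full; the proofs are below) =====
def Claim_equal_check : Prop := ∀ (str : String), Dom_check str → Spec_check str (check str)

-- ===== LEMMAS AND PROOFS =====

theorem countA_foldl (l : List Char) (c : Char) (a : Int) :
    l.foldl (fun ans i => if i == c then ans + 1 else ans) a = a + (l.count c : Int) := by
  induction l generalizing a with
  | nil => simp
  | cons x xs ih =>
    by_cases hx : x = c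
    · rw [List.foldl_cons, if_pos (by simp [hx]), ih]
      simp [hx]; ring
    · rw [List.foldl_cons, if_neg (by simp [hx]), ih]
      simp [hx]

theorem countA_eq_count (l : List Char) (c : Char) : countA l c = (l.count c : Int) := by
  unfold countA; simpa using countA_foldl l c 0

theorem foldl_countP (l : List Char) (p : Char → Bool) (a : Int) :
    l.foldl (fun n i => if p i then n + 1 else n) a = a + (l.countP p : Int) := by
  induction l generalizing a with
  | nil => simp
  | cons x xs ih =>
    by_cases hx : p x
    · rw [List.foldl_cons, if_pos hx, ih]
      simp [hx]; ring
    · rw [List.foldl_cons, if_neg (by simp [hx]), ih]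
      simp [hx]

theorem foldl_count_pos (l : List Char) (p : Char → Bool) :
    (0 < l.foldl (fun n i => if p i then n + 1 else n) (0 : Int)) ↔ ∃ i ∈ l, p i := by
  rw [foldl_countP]
  constructor
  · intro hp
    have h : 0 < l.countP p := by omega
    simpa using List.countP_pos_iff.mp h
  · intro hp
    have h : 0 < l.countP p := List.countP_pos_iff.mpr hp
    omega

theorem values_counter_mem (l : List Char) (n : Int) :
    ((PySem.Dict.counter l).values.contains n ↔ ∃ i ∈ l, (l.count i : Int) = n) := by
  have hvals : (PySem.Dict.counter l).values
      = (PySem.Set.ofList l).map (fun k => ((l.count k : Nat) : Int)) := by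
    have h : (PySem.Dict.counter l).values = (PySem.Dict.counter l).items.map Prod.snd := rfl
    rw [h, PySem.Dict.items_counter, List.map_map]
    rfl
  rw [hvals]
  simp [PySem.Set.mem_ofList]

theorem check_eq (str : String) : check str = check_alt str := by
  simp only [check, check_alt]
  rw [PySem.List.foldl_prod_mk
    (f := fun n i => if countA str.toList i == 2 then n + 1 else n)
    (g := fun n i => if countA str.toList i == 3 then n + 1 else n)]
  rw [PySem.Dict.foldl_insert_getD_add_one_eq_counter]
  have m2 : (∃ i ∈ str.toList, ((countA str.toList i == 2) = true))
      ↔ ∃ i ∈ str.toList, ((str.toList.count i : Nat) : Int) = 2 := by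
    simp [countA_eq_count]
  have m3 : (∃ i ∈ str.toList, ((countA str.toList i == 3) = true))
      ↔ ∃ i ∈ str.toList, ((str.toList.count i : Nat) : Int) = 3 := by
    simp [countA_eq_count]
  have equiv2 : (0 < List.foldl (fun n i => if countA str.toList i == 2 then n + 1 else n) (0 : Int) str.toList)
      ↔ ((PySem.Dict.counter str.toList).values.contains 2 = true) :=
    (foldl_count_pos str.toList (fun i => countA str.toList i == 2)).trans
      (m2.trans (values_counter_mem str.toList 2).symm)
  have equiv3 : (0 < List.foldl (fun n i => if countA str.toList i == 3 then n + 1 else n) (0 : Int) str.toList)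
      ↔ ((PySem.Dict.counter str.toList).values.contains 3 = true) :=
    (foldl_count_pos str.toList (fun i => countA str.toList i == 3)).trans
      (m3.trans (values_counter_mem str.toList 3).symm)
  by_cases f2 : 0 < List.foldl (fun n i => if countA str.toList i == 2 then n + 1 else n) (0 : Int) str.toList <;>
  by_cases f3 : 0 < List.foldl (fun n i => if countA str.toList i == 3 then n + 1 else n) (0 : Int) str.toList
  · have c2 := equiv2.mp f2; have c3 := equiv3.mp f3
    simp only [beq_iff_eq] at f2 f3
    simp only [List.contains_iff_mem] at c2 c3
    simp [f2, f3, c2, c3]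
  · have c2 := equiv2.mp f2; have c3 := mt equiv3.mpr f3
    simp only [beq_iff_eq] at f2 f3
    simp only [List.contains_iff_mem] at c2 c3
    simp [f2, f3, c2, c3]
  · have c2 := mt equiv2.mpr f2; have c3 := equiv3.mp f3
    simp only [beq_iff_eq] at f2 f3
    simp only [List.contains_iff_mem] at c2 c3
    simp [f2, f3, c2, c3]
  · have c2 := mt equiv2.mpr f2; have c3 := mt equiv3.mpr f3
    simp only [beq_iff_eq] at f2 f3
    simp only [List.contains_iff_mem] at c2 c3
    simp [f2, f3, c2, c3]

-- ===== VERDICT (by name: the statement is the Claim_ definition above) =====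
theorem check_spec : Claim_equal_check := by
  intro str _
  unfold Spec_check
  exact check_eq str
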